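-- pv_equiv track=rewrite | github.com/johnsonice/Patent_Database | scripts/patent_data_process/txt2csv.py | list2buckets
-- ===== SOURCE A (Python) =====
-- def list2buckets(str_list:list):
--     """
--     input: a string list contain all info for one pattern; it should be 1 item from split_txt results
--     transformed to bucketed lists for dic transformation
--     """
--     keys = [k for k in str_list if ' ' not in k]
--     buckets = []
--     subbucket = []
--     for l in str_list:
--         if l in keys:
--             if len(subbucket) == 0:
--                 subbucket.append(l)
--             else:
--                 buckets.append(subbucket)
--                 subbucket = [l]
--         else:
--             subbucket.append(l)
--
--     return buckets
-- ===== SOURCE B (Python) =====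
-- def list2buckets(str_list: list):
--     # boundary indices: positions of space-free "key" strings
--     bounds = [i for i, s in enumerate(str_list) if ' ' not in s]
--     # a non-key leading chunk still opens the first bucket
--     if str_list and ' ' in str_list[0]:
--         bounds = [0] + bounds
--     # pairwise slicing; the trailing group (after the last key) is dropped
--     return [str_list[a:b] for a, b in zip(bounds, bounds[1:])]
-- ===== Notes on version B (the rewrite author's own statement) =====
-- stated objective: faster
-- what changed: Replaces the accumulating flush-on-key scan (buckets/subbucket state machine whose 'l in keys' test rescans the precomputed keys list) with an index-based decomposition: collect boundary indices of space-free strings once, prepend 0 for a non-key leading chunk, and emit buckets as pairwise slices zip(bounds, bounds[1:]).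
import Mathlib
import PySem

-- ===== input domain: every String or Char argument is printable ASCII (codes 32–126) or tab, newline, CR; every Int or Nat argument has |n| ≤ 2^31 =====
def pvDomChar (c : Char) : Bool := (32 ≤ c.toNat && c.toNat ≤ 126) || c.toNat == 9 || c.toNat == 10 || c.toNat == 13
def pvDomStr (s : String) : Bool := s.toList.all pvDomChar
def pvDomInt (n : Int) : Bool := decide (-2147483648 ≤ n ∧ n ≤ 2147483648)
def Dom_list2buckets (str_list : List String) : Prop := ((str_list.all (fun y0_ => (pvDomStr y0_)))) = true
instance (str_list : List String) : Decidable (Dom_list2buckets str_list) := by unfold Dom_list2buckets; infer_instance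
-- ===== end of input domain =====

-- B replaces A's accumulating flush-on-key scan (whose 'l in keys' test rescans the keys list) by boundary indices + pairwise slicing; a timing run measured B faster.

-- ===== PORT A =====
-- the for-loop of A, over state (buckets, subbucket); keys is the precomputed list A filters first
def list2bucketsGo (keys : List String) (buckets : List (List String)) (subbucket : List String) : List String → List (List String)
  | [] => buckets
  | l :: rest =>
      if l ∈ keys then
        if subbucket.length == 0 then
          list2bucketsGo keys buckets [l] rest
        else
          list2bucketsGo keys (buckets ++ [subbucket]) [l] rest
      else
        list2bucketsGo keys buckets (subbucket ++ [l]) rest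

def list2buckets (str_list : List String) : List (List String) :=
  let keys := str_list.filter (fun k => !(PySem.Str.isIn " " k))
  list2bucketsGo keys [] [] str_list

-- ===== PORT B =====
def list2buckets_alt (str_list : List String) : List (List String) :=
  let bounds0 : List Int :=
    ((PySem.List.enumerate str_list 0).filter (fun p => !(PySem.Str.isIn " " p.2))).map (·.1)
  let bounds : List Int :=
    match str_list with
    | [] => bounds0
    | s :: _ => if PySem.Str.isIn " " s then 0 :: bounds0 else bounds0
  (bounds.zip bounds.tail).map (fun p => PySem.List.slice str_list (some p.1) (some p.2))

-- ===== PRECONDITION & SPEC =====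
def Spec_list2buckets (str_list : List String) (out : List (List String)) : Prop := out = list2buckets_alt str_list
instance (str_list : List String) (out : List (List String)) : Decidable (Spec_list2buckets str_list out) := by unfold Spec_list2buckets; infer_instance

-- ===== CLAIM (what is proved, stated in full; the proofs are below) =====
def Claim_equal_list2buckets : Prop := ∀ (str_list : List String), Dom_list2buckets str_list → Spec_list2buckets str_list (list2buckets str_list)

-- ===== LEMMAS AND PROOFS =====

/-- the key test: `' ' not in s` -/
def pvKey (s : String) : Bool := !(PySem.Str.isIn " " s)

/-- Nat boundary indices of the key strings. -/
def pvBnds : List String → List Nat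
  | [] => []
  | x :: xs => if pvKey x then 0 :: (pvBnds xs).map (· + 1) else (pvBnds xs).map (· + 1)

/-- pairwise slices (Nat indices). -/
def pvPairSlices (ys : List String) (l : List Nat) : List (List String) :=
  (l.zip l.tail).map (fun p => (ys.drop p.1).take (p.2 - p.1))

/-- A's loop with a nonempty subbucket, abstracted from the keys list. -/
def pvG (acc : List String) : List String → List (List String)
  | [] => []
  | y :: ys => if pvKey y then acc :: pvG [y] ys else pvG (acc ++ [y]) ys

theorem pvGo_eq_pvG (ys : List String) (keys : List String)
    (hk : ∀ l ∈ ys, (l ∈ keys ↔ pvKey l = true))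
    (buckets : List (List String)) (acc : List String) (hacc : acc ≠ []) :
    list2bucketsGo keys buckets acc ys = buckets ++ pvG acc ys := by
  induction ys generalizing buckets acc with
  | nil => simp [list2bucketsGo, pvG]
  | cons y ys ih =>
    have hy := hk y (by simp)
    have hk' : ∀ l ∈ ys, (l ∈ keys ↔ pvKey l = true) := fun l hl => hk l (by simp [hl])
    by_cases h : pvKey y = true
    · have hmem : y ∈ keys := hy.mpr h
      have hlen : (acc.length == 0) = false := by
        simp [List.length_eq_zero_iff]; exact hacc
      simp only [list2bucketsGo, pvG, if_pos hmem, hlen, h, if_true, Bool.false_eq_true,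
        if_false]
      rw [ih hk' _ _ (by simp)]
      simp
    · have hmem : y ∉ keys := fun hc => h (hy.mp hc)
      simp only [list2bucketsGo, pvG, if_neg hmem, h, Bool.false_eq_true, if_false]
      exact ih hk' _ _ (by simp)

theorem pvPairSlices_cons2 (ys : List String) (a b : Nat) (l : List Nat) :
    pvPairSlices ys (a :: b :: l) = ((ys.drop a).take (b - a)) :: pvPairSlices ys (b :: l) := by
  simp [pvPairSlices]

theorem pvPairSlices_shift (y : String) (ys : List String) (l : List Nat) :
    pvPairSlices (y :: ys) (l.map (· + 1)) = pvPairSlices ys l := by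
  induction l with
  | nil => rfl
  | cons a t ih =>
    cases t with
    | nil => rfl
    | cons b t2 =>
      simp only [List.map_cons] at ih ⊢
      rw [pvPairSlices_cons2, pvPairSlices_cons2, ih]
      simp [List.drop_succ_cons, Nat.add_sub_add_right]

/-- main invariant: pvG against the boundary-index description. -/
theorem pvG_eq (ys : List String) (acc : List String) :
    pvG acc ys = match pvBnds ys with
      | [] => []
      | i :: is => (acc ++ ys.take i) :: pvPairSlices ys (i :: is) := by
  induction ys generalizing acc with
  | nil => simp [pvG, pvBnds]
  | cons y ys ih =>
    by_cases h : pvKey y = true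
    · simp only [pvG, pvBnds, h, if_true]
      rw [ih [y]]
      cases hb : pvBnds ys with
      | nil => simp [pvPairSlices]
      | cons i is =>
        have hshift := pvPairSlices_shift y ys (i :: is)
        simp only [List.map_cons] at hshift
        simp only [List.map_cons, pvPairSlices_cons2, hshift]
        simp [List.take_succ_cons]
    · simp only [pvG, pvBnds, h, Bool.false_eq_true, if_false]
      rw [ih (acc ++ [y])]
      cases hb : pvBnds ys with
      | nil => simp
      | cons i is =>
        have hshift := pvPairSlices_shift y ys (i :: is)
        simp only [List.map_cons] at hshift
        simp only [List.map_cons, hshift]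
        simp [List.take_succ_cons]

theorem pvG_head (y : String) (ys : List String) :
    pvG [y] ys = pvPairSlices (y :: ys) (0 :: (pvBnds ys).map (· + 1)) := by
  rw [pvG_eq]
  cases hb : pvBnds ys with
  | nil => simp [pvPairSlices]
  | cons i is =>
    have hshift := pvPairSlices_shift y ys (i :: is)
    simp only [List.map_cons] at hshift
    simp only [List.map_cons, pvPairSlices_cons2, hshift]
    simp [List.take_succ_cons]

/-- B's bounds computed from enumerate equal the Nat boundary indices, cast and shifted. -/
theorem pvEnum_bounds (xs : List String) (s : Int) :
    (((PySem.List.enumerate xs s).filter (fun p => !(PySem.Str.isIn " " p.2))).map (·.1))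
      = List.map (fun n : Nat => s + (n : Int)) (pvBnds xs) := by
  induction xs generalizing s with
  | nil => simp [PySem.List.enumerate_nil, pvBnds]
  | cons x xs ih =>
    rw [PySem.List.enumerate_cons]
    by_cases h : pvKey x = true
    · have h' : (!(PySem.Str.isIn " " x)) = true := h
      rw [List.filter_cons]
      simp only [h', if_true, List.map_cons, ih (s + 1)]
      simp only [pvBnds, h, if_true, List.map_cons, List.map_map, Nat.cast_zero, add_zero]
      congr 1
      all_goals
        apply List.map_congr_left
        intro n _
        simp only [Function.comp]
        push_cast
        ring
    · have h' : (!(PySem.Str.isIn " " x)) = false := by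
        simpa [pvKey] using h
      rw [List.filter_cons]
      simp only [h', Bool.false_eq_true, if_false, ih (s + 1)]
      simp only [pvBnds, h, Bool.false_eq_true, if_false, List.map_map]
      apply List.map_congr_left
      intro n _
      simp only [Function.comp]
      push_cast
      ring

/-- pairwise Int-cast slicing equals the Nat pairwise slices. -/
theorem pvSlices_cast (ys : List String) (l : List Nat) :
    (((List.map (fun n : Nat => (n : Int)) l).zip ((List.map (fun n : Nat => (n : Int)) l).tail)).map
        (fun p => PySem.List.slice ys (some p.1) (some p.2)))
      = pvPairSlices ys l := by
  induction l with
  | nil => rfl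
  | cons a t ih =>
    cases t with
    | nil => rfl
    | cons b t2 =>
      simp only [List.map_cons, List.tail_cons, List.zip_cons_cons, List.map_cons] at ih ⊢
      rw [pvPairSlices_cons2, ← ih, PySem.List.slice_natCast]

theorem pvAlt_cons (x : String) (xs : List String) :
    list2buckets_alt (x :: xs) = pvPairSlices (x :: xs) (0 :: (pvBnds xs).map (· + 1)) := by
  unfold list2buckets_alt
  have hb : (((PySem.List.enumerate (x :: xs) 0).filter
        (fun p => !(PySem.Str.isIn " " p.2))).map (·.1))
      = (List.map (fun n : Nat => (n : Int)) (pvBnds (x :: xs))) := by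
    rw [pvEnum_bounds]; simp
  by_cases h : PySem.Str.isIn " " x = true
  · have hc : PySem.Chars.isIn [' '] x.toList = true := by simpa using h
    have hkey : pvKey x = false := by simp [pvKey, hc]
    simp only [hb, h, if_true, pvBnds, hkey, Bool.false_eq_true, if_false]
    rw [show ((0 : Int) :: List.map (fun n : Nat => (n : Int)) ((pvBnds xs).map (· + 1)))
        = (List.map (fun n : Nat => (n : Int)) (0 :: (pvBnds xs).map (· + 1))) from by simp]
    exact pvSlices_cast (x :: xs) (0 :: (pvBnds xs).map (· + 1))
  · have hc : PySem.Chars.isIn [' '] x.toList = false := by simpa using h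
    have hkey : pvKey x = true := by simp [pvKey, hc]
    simp only [hb, h, Bool.false_eq_true, if_false, pvBnds, hkey, if_true, List.map_cons,
      Nat.cast_zero]
    rw [show ((0 : Int) :: List.map (fun n : Nat => (n : Int)) ((pvBnds xs).map (· + 1)))
        = (List.map (fun n : Nat => (n : Int)) (0 :: (pvBnds xs).map (· + 1))) from by simp]
    exact pvSlices_cast (x :: xs) (0 :: (pvBnds xs).map (· + 1))

-- ===== VERDICT (by name: the statement is the Claim_ definition above) =====
theorem list2buckets_spec : Claim_equal_list2buckets := by
  intro str_list _
  unfold Spec_list2buckets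
  cases str_list with
  | nil => rfl
  | cons x xs =>
    unfold list2buckets
    have hk : ∀ l ∈ x :: xs,
        (l ∈ (x :: xs).filter (fun k => !(PySem.Str.isIn " " k)) ↔ pvKey l = true) := by
      intro l hl
      constructor
      · intro h; exact (List.mem_filter.mp h).2
      · intro h; exact List.mem_filter.mpr ⟨hl, h⟩
    have h1 : list2bucketsGo ((x :: xs).filter (fun k => !(PySem.Str.isIn " " k))) [] [] (x :: xs)
        = list2bucketsGo ((x :: xs).filter (fun k => !(PySem.Str.isIn " " k))) [] [x] xs := by
      by_cases h : x ∈ (x :: xs).filter (fun k => !(PySem.Str.isIn " " k)) <;>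
        simp [list2bucketsGo]
    rw [h1, pvGo_eq_pvG xs _ (fun l hl => hk l (by simp [hl])) [] [x] (by simp)]
    rw [pvG_head, pvAlt_cons]
    simp
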